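-- pv_equiv track=rewrite | github.com/eggnee/Algorithm | 프로그래머스/1/82612. 부족한 금액 계산하기/부족한 금액 계산하기.py | solution
-- ===== SOURCE A (Python) =====
-- def solution(price, money, count):
--     hap = 0
--     for i in range(1, count+1):
--         hap += i * price
--     answer = hap - money
--     if answer > 0 :
--         return answer
--     else:
--         return 0
-- ===== SOURCE B (Python) =====
-- def solution(price, money, count):
--     return max(0, price * count * (count + 1) // 2 - money)
-- ===== Notes on version B (the rewrite author's own statement) =====
-- stated objective: faster
-- what changed: Replaced the O(count) summation loop with the closed-form arithmetic series price*count*(count+1)//2, clamped with max.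
-- outside the precondition, e.g. on solution(1, 0, -2): A returns 0, B returns 1
import Mathlib
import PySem

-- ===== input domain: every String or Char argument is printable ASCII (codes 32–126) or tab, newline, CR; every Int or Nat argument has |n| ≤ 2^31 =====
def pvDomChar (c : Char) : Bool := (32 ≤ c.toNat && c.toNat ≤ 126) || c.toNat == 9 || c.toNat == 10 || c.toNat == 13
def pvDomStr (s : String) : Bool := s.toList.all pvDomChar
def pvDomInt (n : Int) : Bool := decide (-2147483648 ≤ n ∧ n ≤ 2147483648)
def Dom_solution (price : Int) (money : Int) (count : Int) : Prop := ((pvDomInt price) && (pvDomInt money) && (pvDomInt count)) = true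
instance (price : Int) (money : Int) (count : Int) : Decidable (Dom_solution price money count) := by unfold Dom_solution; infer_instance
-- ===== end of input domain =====

-- B replaces A's O(count) summation loop by the closed-form series price*count*(count+1)//2 (O(1)).

-- ===== PORT A =====
def solution (price : Int) (money : Int) (count : Int) : Int :=
  let hap := (PySem.List.pyRange 1 (count + 1) 1).foldl (fun h i => h + i * price) 0
  let answer := hap - money
  if answer > 0 then answer else 0

-- ===== PORT B =====
def solution_alt (price : Int) (money : Int) (count : Int) : Int :=
  max 0 (PySem.Int.floordiv (price * count * (count + 1)) 2 - money)

-- ===== PRECONDITION & SPEC =====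
-- Pre_ restricts to the task's natural domain of a nonnegative purchase count; for negative
-- count A's loop is trivially empty while the closed-form series is meaningless.
def Pre_solution (price : Int) (money : Int) (count : Int) : Prop := 0 ≤ count
instance (price : Int) (money : Int) (count : Int) : Decidable (Pre_solution price money count) := by unfold Pre_solution; infer_instance
def pvWitness_solution : Int × Int × Int := (3, 20, 4)
def Spec_solution (price : Int) (money : Int) (count : Int) (out : Int) : Prop := out = solution_alt price money count
instance (price : Int) (money : Int) (count : Int) (out : Int) : Decidable (Spec_solution price money count out) := by unfold Spec_solution; infer_instance

-- ===== CLAIM (what is proved, stated in full; the proofs are below) =====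
def Claim_equal_solution : Prop := ∀ (price : Int) (money : Int) (count : Int), Dom_solution price money count → Pre_solution price money count → Spec_solution price money count (solution price money count)

-- ===== LEMMAS AND PROOFS =====

-- The loop sum: 2 * Σ_{i=1}^{n} i*price = price * n * (n+1).
lemma fold_sum (price : Int) (n : Nat) :
    2 * (PySem.List.pyRange 1 ((n : Int) + 1) 1).foldl (fun h i => h + i * price) 0
      = price * n * (n + 1) := by
  induction n with
  | zero => simp [PySem.List.pyRange_one_eq_nil]
  | succ k ih =>
    have h : PySem.List.pyRange 1 (((k : Int) + 1) + 1) 1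
        = PySem.List.pyRange 1 ((k : Int) + 1) 1 ++ [(k : Int) + 1] :=
      PySem.List.pyRange_one_succ_right (by omega)
    push_cast
    rw [show ((k : Int) + 1 + 1) = (((k : Int) + 1) + 1) from rfl, h, List.foldl_append]
    simp only [List.foldl]
    ring_nf
    ring_nf at ih
    omega

lemma floordiv_exact (x k : Int) (h : x = 2 * k) : PySem.Int.floordiv x 2 = k := by
  rw [PySem.Int.floordiv_eq_ediv_of_pos (by omega), h, Int.mul_ediv_cancel_left _ (by omega)]

-- ===== VERDICT (by name: the statement is the Claim_ definition above) =====
theorem solution_spec : Claim_equal_solution := by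
  intro price money count _ hpre
  obtain ⟨n, rfl⟩ := Int.eq_ofNat_of_zero_le hpre
  unfold Spec_solution solution solution_alt
  have hs := fold_sum price n
  have hd : PySem.Int.floordiv (price * (n : Int) * ((n : Int) + 1)) 2
      = (PySem.List.pyRange 1 ((n : Int) + 1) 1).foldl (fun h i => h + i * price) 0 :=
    floordiv_exact _ _ hs.symm
  simp only [hd]
  omega
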